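-- pv_equiv track=rewrite | github.com/dariaomelkina/automata_converter | src/main.py | get_normal_delta_representation
-- ===== SOURCE A (Python) =====
-- def get_normal_delta_representation(transitions):
--     """
--     :param transitions: {state:[(element1,state1), (element1, state2), ...]}
--     :return: {state:{element:(state1, state2, ...), ...}
--     """
--     adequate_q = dict()
--     for state in transitions:
--         adequate_q[state] = dict()
--         for transition in transitions[state]:
--             if transition[0] in adequate_q[state]:  # element
--                 adequate_q[state][transition[0]].add(transition[1])
--             else:
--                 adequate_q[state][transition[0]] = {transition[1]}
--     return adequate_q
-- ===== SOURCE B (Python) =====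
-- def get_normal_delta_representation(transitions):
--     """
--     :param transitions: {state:[(element1,state1), (element1, state2), ...]}
--     :return: {state:{element:(state1, state2, ...), ...}
--     """
--     return {
--         state: {
--             element: {s for el, s in pairs if el == element}
--             for element in dict.fromkeys(el for el, _ in pairs)
--         }
--         for state, pairs in transitions.items()
--     }
-- ===== Notes on version B (the rewrite author's own statement) =====
-- stated objective: idiomatic
-- what changed: A builds each state's dict in one incremental pass, membership-testing and mutating a set per transition; B instead first collects the distinct elements per state (dict.fromkeys) and then builds each element's target set by filtering the state's transition list, as nested dict/set comprehensions.
import Mathlib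
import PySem

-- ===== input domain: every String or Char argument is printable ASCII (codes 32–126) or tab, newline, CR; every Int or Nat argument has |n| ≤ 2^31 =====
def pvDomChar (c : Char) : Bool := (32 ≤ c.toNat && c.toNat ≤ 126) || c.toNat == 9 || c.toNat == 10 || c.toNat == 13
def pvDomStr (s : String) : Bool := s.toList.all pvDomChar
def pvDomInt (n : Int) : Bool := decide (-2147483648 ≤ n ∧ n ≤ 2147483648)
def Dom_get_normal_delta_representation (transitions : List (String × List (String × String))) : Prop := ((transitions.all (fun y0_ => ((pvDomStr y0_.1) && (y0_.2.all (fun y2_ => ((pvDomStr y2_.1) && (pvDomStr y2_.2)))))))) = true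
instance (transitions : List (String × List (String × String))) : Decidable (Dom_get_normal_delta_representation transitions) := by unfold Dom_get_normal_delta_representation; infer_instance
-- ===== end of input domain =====

-- B replaces A's single incremental membership-test-and-update pass per state with the
-- idiomatic nested-comprehension form: collect the distinct elements first, then build each
-- element's target set by filtering the state's transition list (objective: idiomatic).

-- ===== PORT A =====
-- the body of A's inner loop: one transition updates the per-state dict of sets
def pvStepA (d : PySem.Dict String (PySem.Set String)) (tr : String × String) :
    PySem.Dict String (PySem.Set String) :=
  if PySem.Dict.contains d tr.1 then
    PySem.Dict.modify d tr.1 [] (fun s => PySem.Set.add s tr.2)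
  else
    PySem.Dict.insert d tr.1 (PySem.Set.ofList [tr.2])

def get_normal_delta_representation (transitions : List (String × List (String × String))) : List (String × List (String × List String)) :=
  let tdict : PySem.Dict String (List (String × String)) := PySem.Dict.mk transitions
  let adequate_q : PySem.Dict String (PySem.Dict String (PySem.Set String)) :=
    tdict.keys.foldl
      (fun aq state =>
        PySem.Dict.insert aq state
          ((PySem.Dict.getD tdict state []).foldl pvStepA PySem.Dict.empty))
      PySem.Dict.empty
  adequate_q.items.map (fun p => (p.1, p.2.items))

-- ===== PORT B =====
-- the inner dict comprehension of Source B: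
-- {element: {s for el, s in pairs if el == element} for element in dict.fromkeys(el for el, _ in pairs)}
def pvInnerB (pairs : List (String × String)) : List (String × List String) :=
  (PySem.List.dedup (pairs.map (·.1))).map
    (fun element => (element, PySem.Set.ofList ((pairs.filter (fun q => q.1 == element)).map (·.2))))

def get_normal_delta_representation_alt (transitions : List (String × List (String × String))) : List (String × List (String × List String)) :=
  transitions.map (fun p => (p.1, pvInnerB p.2))

-- ===== PRECONDITION & SPEC =====
-- Pre_ excludes association lists with duplicate state keys: a Python dict cannot carry
-- duplicate keys (they collapse at construction, before A ever runs), so such lists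
-- correspond to no Python input; A is never called on them.
def Pre_get_normal_delta_representation (transitions : List (String × List (String × String))) : Prop :=
  (transitions.map (·.1)).Nodup
instance (transitions : List (String × List (String × String))) : Decidable (Pre_get_normal_delta_representation transitions) := by unfold Pre_get_normal_delta_representation; infer_instance

def pvWitness_get_normal_delta_representation : (List (String × List (String × String))) :=
  [("q0", [("a", "q1"), ("a", "q2"), ("b", "q1"), ("a", "q1")]), ("q1", [])]

def Spec_get_normal_delta_representation (transitions : List (String × List (String × String))) (out : List (String × List (String × List String))) : Prop := out = get_normal_delta_representation_alt transitions
instance (transitions : List (String × List (String × String))) (out : List (String × List (String × List String))) : Decidable (Spec_get_normal_delta_representation transitions out) := by unfold Spec_get_normal_delta_representation; infer_instance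

-- ===== CLAIM (what is proved, stated in full; the proofs are below) =====
def Claim_equal_get_normal_delta_representation : Prop := ∀ (transitions : List (String × List (String × String))), Dom_get_normal_delta_representation transitions → Pre_get_normal_delta_representation transitions → Spec_get_normal_delta_representation transitions (get_normal_delta_representation transitions)

-- ===== LEMMAS AND PROOFS =====

lemma pvOfList_concat {α : Type} [BEq α] (ys : List α) (y : α) :
    PySem.Set.ofList (ys ++ [y]) = PySem.Set.add (PySem.Set.ofList ys) y := by
  simp [PySem.Set.ofList_eq_foldl, List.foldl_append]

lemma pvDedup_concat (xs : List String) (x : String) :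
    PySem.List.dedup (xs ++ [x]) = if x ∈ xs then PySem.List.dedup xs else PySem.List.dedup xs ++ [x] := by
  rw [PySem.List.dedup_eq_ofList, PySem.List.dedup_eq_ofList,
    PySem.Set.ofList_eq_foldl, List.foldl_append, ← PySem.Set.ofList_eq_foldl]
  show PySem.Set.add _ x = _
  simp [PySem.Set.add, PySem.Set.contains, PySem.Set.mem_ofList]

lemma pvInnerB_keys (pairs : List (String × String)) :
    (pvInnerB pairs).map (·.1) = PySem.List.dedup (pairs.map (·.1)) := by
  simp only [pvInnerB, List.map_map]
  exact List.map_id _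

-- A's inner loop over one state's transition list produces exactly B's inner comprehension
lemma pvInner_eq (ts : List (String × String)) :
    (ts.foldl pvStepA PySem.Dict.empty).items = pvInnerB ts := by
  induction ts using List.reverseRecOn with
  | nil => rfl
  | append_singleton l t ih =>
    rw [List.foldl_append]
    simp only [List.foldl_cons, List.foldl_nil]
    set d := l.foldl pvStepA PySem.Dict.empty with hd
    have hkeys : d.keys = PySem.List.dedup (l.map (·.1)) := by
      simp only [PySem.Dict.keys, ih, pvInnerB_keys]
    have hnodk : d.keys.Nodup := by rw [hkeys]; exact PySem.List.nodup_dedup _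
    by_cases hmem : t.1 ∈ l.map (·.1)
    · have hc : PySem.Dict.contains d t.1 = true := by
        rw [PySem.Dict.contains_iff_mem_keys, hkeys, PySem.List.mem_dedup]; exact hmem
      have hget : PySem.Dict.getD d t.1 [] =
          PySem.Set.ofList ((l.filter (fun q => q.1 == t.1)).map (·.2)) := by
        refine PySem.Dict.getD_of_mem_items d ?_ hnodk []
        rw [ih]
        have h1 : t.1 ∈ PySem.List.dedup (l.map (·.1)) := (PySem.List.mem_dedup _ _).2 hmem
        simpa [pvInnerB] using List.mem_map_of_mem
          (f := fun element => (element, PySem.Set.ofList ((l.filter (fun q => q.1 == element)).map (·.2)))) h1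
      have hdedup : PySem.List.dedup ((l ++ [t]).map (·.1)) = PySem.List.dedup (l.map (·.1)) := by
        rw [List.map_append, List.map_cons, List.map_nil, pvDedup_concat, if_pos hmem]
      have hstep : pvStepA d t = PySem.Dict.insert d t.1
          (PySem.Set.add (PySem.Dict.getD d t.1 []) t.2) := by
        simp only [pvStepA, hc, if_true]; rfl
      rw [hstep, PySem.Dict.items_insert_of_contains d _ hc, ih]
      unfold pvInnerB
      rw [hdedup, List.map_map]
      apply List.map_congr_left
      intro e he
      simp only [Function.comp_apply]
      by_cases heq : e = t.1
      · subst heq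
        simp only [beq_self_eq_true, if_true]
        rw [hget, List.filter_append]
        have hft : List.filter (fun q => q.1 == t.1) [t] = [t] := by simp [List.filter]
        rw [hft]
        simp only [List.map_append, List.map_cons, List.map_nil]
        rw [pvOfList_concat]
      · have hne : (e == t.1) = false := by simp [heq]
        simp only [hne, if_neg, Bool.false_eq_true, not_false_eq_true]
        rw [List.filter_append]
        have : List.filter (fun q => q.1 == e) [t] = [] := by
          simp [List.filter, show (t.1 == e) = false by simp [Ne.symm heq]]
        rw [this, List.append_nil]
    · have hc : PySem.Dict.contains d t.1 = false := by
        rw [← Bool.not_eq_true, PySem.Dict.contains_iff_mem_keys, hkeys, PySem.List.mem_dedup]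
        exact hmem
      have hstep : pvStepA d t = PySem.Dict.insert d t.1 (PySem.Set.ofList [t.2]) := by
        simp [pvStepA, hc]
      rw [hstep, PySem.Dict.items_insert_of_not_contains d _ hc, ih]
      unfold pvInnerB
      have hdedup : PySem.List.dedup ((l ++ [t]).map (·.1)) = PySem.List.dedup (l.map (·.1)) ++ [t.1] := by
        rw [List.map_append, List.map_cons, List.map_nil, pvDedup_concat, if_neg hmem]
      rw [hdedup, List.map_append]
      congr 1
      · apply List.map_congr_left
        intro e he
        have hemem : e ∈ l.map (·.1) := (PySem.List.mem_dedup _ _).1 he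
        have hne : (t.1 == e) = false := by
          simp only [beq_eq_false_iff_ne]; rintro rfl; exact hmem hemem
        rw [List.filter_append]
        have : List.filter (fun q => q.1 == e) [t] = [] := by simp [List.filter, hne]
        rw [this, List.append_nil]
      · simp only [List.map_cons, List.map_nil]
        have hfl : List.filter (fun q => q.1 == t.1) l = [] := by
          rw [List.filter_eq_nil_iff]
          intro q hq h
          exact absurd (eq_of_beq h ▸ List.mem_map_of_mem (f := (·.1)) hq) hmem
        rw [List.filter_append, hfl]
        simp [List.filter]

-- ===== VERDICT (by name: the statement is the Claim_ definition above) =====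
theorem get_normal_delta_representation_spec : Claim_equal_get_normal_delta_representation := by
  intro transitions _hdom hpre
  unfold Spec_get_normal_delta_representation get_normal_delta_representation_alt
  show (List.map (fun p => (p.1, p.2.items))
      (List.foldl (fun aq state => PySem.Dict.insert aq state
          (List.foldl pvStepA PySem.Dict.empty (PySem.Dict.getD (PySem.Dict.mk transitions) state [])))
        PySem.Dict.empty (PySem.Dict.keys (PySem.Dict.mk transitions))).items) = _
  have hkeys : (PySem.Dict.mk transitions).keys = transitions.map (·.1) := rfl
  rw [PySem.Dict.items_foldl_insert_fresh (PySem.Dict.keys (PySem.Dict.mk transitions)) (fun s => s)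
      (fun state => (PySem.Dict.getD (PySem.Dict.mk transitions) state []).foldl pvStepA PySem.Dict.empty)
      PySem.Dict.empty
      (fun a _ => PySem.Dict.contains_empty a) (by simpa [hkeys] using hpre)]
  have hemp : (PySem.Dict.empty : PySem.Dict String (PySem.Dict String (PySem.Set String))).items = [] := rfl
  rw [hemp, List.nil_append, hkeys, List.map_map, List.map_map]
  apply List.map_congr_left
  intro p hp
  simp only [Function.comp_apply]
  have hget : PySem.Dict.getD (PySem.Dict.mk transitions) p.1 [] = p.2 := by
    refine PySem.Dict.getD_of_mem_items (PySem.Dict.mk transitions) ?_ (hkeys ▸ hpre) []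
    simpa using hp
  rw [hget, pvInner_eq]
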